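-- pv_equiv track=rewrite | github.com/yoonsunny17/TIL | algorithm/IM/케이크자르기/sol1.py | up_down
-- ===== SOURCE A (Python) =====
-- def up_down(N, matrix, total):
--     r = 0
--     up = 0
--     while r < N - 1:
--         up += sum(matrix[r])
--         r += 1
--         # 종료조건1. 성공한 경우
--         if up == total // 2:
--             return 1
--
--         # 종료조건2. 실패한 경우
--         if r == N - 1 and up != total // 2:
--             return 0
-- ===== SOURCE B (Python) =====
-- def up_down(N, matrix, total):
--     # Reverse scan with an algebraic transform: a prefix of the first N-1 row
--     # totals sums to total//2  iff  T - (some suffix sum) == total//2, where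
--     # T is the total of the first N-1 rows.  So compute T once, then walk the
--     # rows BACK-TO-FRONT maintaining a suffix sum, with no prefix table and no
--     # early exit.
--     if N < 2:
--         return None
--     half = total // 2
--     T = sum(sum(matrix[r]) for r in range(N - 1))
--     found = (T == half)            # the full prefix (suffix = 0)
--     suffix = 0
--     for r in range(N - 2, 0, -1):
--         suffix += sum(matrix[r])
--         if T - suffix == half:
--             found = True
--     return 1 if found else 0
-- ===== Notes on version B (the rewrite author's own statement) =====
-- stated objective: alternative
-- what changed: A scans rows front-to-back accumulating a prefix sum with early returns; B computes the total T of the first N-1 rows once, then scans rows back-to-front maintaining a suffix sum and tests T - suffix == total//2, keeping no prefix state and no early exit.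
-- outside the precondition, e.g. on up_down(1, [[1]], 1): A returns None, B returns None; on up_down(4, [[0]], 1): A returns 1, B raises IndexError
import Mathlib
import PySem

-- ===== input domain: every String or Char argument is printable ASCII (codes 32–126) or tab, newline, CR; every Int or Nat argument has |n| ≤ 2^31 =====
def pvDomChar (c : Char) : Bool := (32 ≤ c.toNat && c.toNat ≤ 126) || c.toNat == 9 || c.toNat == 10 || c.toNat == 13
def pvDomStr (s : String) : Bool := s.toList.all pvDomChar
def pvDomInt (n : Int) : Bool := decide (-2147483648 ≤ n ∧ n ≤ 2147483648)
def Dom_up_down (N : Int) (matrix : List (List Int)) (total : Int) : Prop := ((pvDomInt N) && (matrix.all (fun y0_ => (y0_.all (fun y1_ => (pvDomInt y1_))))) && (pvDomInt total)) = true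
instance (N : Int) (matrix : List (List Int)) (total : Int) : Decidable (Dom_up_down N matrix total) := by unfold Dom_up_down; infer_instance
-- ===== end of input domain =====

-- B replaces A's forward prefix scan with early returns by a back-to-front suffix-sum
-- scan against the precomputed total of the first N-1 rows (objective: alternative).

-- ===== PORT A =====
-- the while loop of A, state (r, up); terminates on the Int measure N-1-r
def upDownLoopA (N : Int) (matrix : List (List Int)) (total : Int) (r up : Int) : Int :=
  if h : r < N - 1 then
    let up' := up + ((PySem.List.pyGet? matrix r).getD []).sum
    let r' := r + 1
    if up' = PySem.Int.floordiv total 2 then 1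
    else if r' = N - 1 then 0
    else upDownLoopA N matrix total r' up'
  else 0  -- Python falls off the loop here (returns None); excluded by Pre_
termination_by (N - 1 - r).toNat
decreasing_by omega

def up_down (N : Int) (matrix : List (List Int)) (total : Int) : Int :=
  upDownLoopA N matrix total 0 0

-- ===== PORT B =====
def rowSumB (matrix : List (List Int)) (r : Int) : Int :=
  ((PySem.List.pyGet? matrix r).getD []).sum

def up_down_alt (N : Int) (matrix : List (List Int)) (total : Int) : Int :=
  if N < 2 then 0  -- Python B returns None here; excluded by Pre_
  else
    let half := PySem.Int.floordiv total 2
    let T := ((PySem.List.pyRange 0 (N - 1) 1).map (rowSumB matrix)).sum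
    let st := (PySem.List.pyRange (N - 2) 0 (-1)).foldl
      (fun p r =>
        let s := p.1 + rowSumB matrix r
        (s, p.2 || decide (T - s = half)))
      (0, decide (T = half))
    if st.2 then 1 else 0

-- ===== PRECONDITION & SPEC =====
-- Pre_ excludes N ≤ 1, where A falls off the loop and returns None (not an int), and
-- matrices with fewer than N-1 rows, where A raises IndexError unless its fused scan
-- happens to hit total//2 and return early before the missing row (B raises there).
def Pre_up_down (N : Int) (matrix : List (List Int)) (total : Int) : Prop :=
  2 ≤ N ∧ N - 1 ≤ (matrix.length : Int)
instance (N : Int) (matrix : List (List Int)) (total : Int) : Decidable (Pre_up_down N matrix total) := by unfold Pre_up_down; infer_instance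
def pvWitness_up_down : Int × List (List Int) × Int := (3, [[1, 2], [3], [4]], 8)

def Spec_up_down (N : Int) (matrix : List (List Int)) (total : Int) (out : Int) : Prop := out = up_down_alt N matrix total
instance (N : Int) (matrix : List (List Int)) (total : Int) (out : Int) : Decidable (Spec_up_down N matrix total out) := by unfold Spec_up_down; infer_instance

-- ===== CLAIM (what is proved, stated in full; the proofs are below) =====
def Claim_equal_up_down : Prop := ∀ (N : Int) (matrix : List (List Int)) (total : Int), Dom_up_down N matrix total → Pre_up_down N matrix total → Spec_up_down N matrix total (up_down N matrix total)

-- ===== LEMMAS AND PROOFS =====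

-- the list of prefix sums s + t₁, s + t₁ + t₂, …
def prefList (s : Int) : List Int → List Int
  | [] => []
  | t :: ts => (s + t) :: prefList (s + t) ts

-- A's loop returns 1 iff total//2 occurs among the prefix sums of the remaining row totals
theorem loopA_eq (N : Int) (matrix : List (List Int)) (total : Int)
    (k : Nat) (r up : Int) (hk : (N - 1 - r).toNat = k) :
    upDownLoopA N matrix total r up =
      (if PySem.Int.floordiv total 2 ∈
          prefList up ((PySem.List.pyRange r (N - 1) 1).map (rowSumB matrix)) then 1 else 0) := by
  induction k generalizing r up with
  | zero =>
    have hge : N - 1 ≤ r := by omega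
    rw [upDownLoopA, dif_neg (by omega), PySem.List.pyRange_one_eq_nil hge]
    simp [prefList]
  | succ k ih =>
    have hlt : r < N - 1 := by omega
    rw [upDownLoopA, PySem.List.pyRange_one_cons hlt]
    simp only [dif_pos hlt, List.map_cons, prefList, List.mem_cons]
    by_cases h1 : up + rowSumB matrix r = PySem.Int.floordiv total 2
    · rw [show ((PySem.List.pyGet? matrix r).getD []).sum = rowSumB matrix r from rfl,
        if_pos h1, if_pos (Or.inl h1.symm)]
    · rw [show ((PySem.List.pyGet? matrix r).getD []).sum = rowSumB matrix r from rfl, if_neg h1]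
      by_cases h2 : r + 1 = N - 1
      · rw [if_pos h2, PySem.List.pyRange_one_eq_nil (by omega), if_neg]
        rintro (h | h)
        · exact h1 h.symm
        · simp [prefList] at h
      · rw [if_neg h2, ih _ _ (by omega),
          if_congr (or_iff_right (fun h => h1 h.symm)) rfl rfl]

-- membership in the prefix-sum list = a nonempty-prefix split
theorem mem_prefList (x s : Int) (X : List Int) :
    x ∈ prefList s X ↔ ∃ a b, X = a ++ b ∧ a ≠ [] ∧ x = s + a.sum := by
  induction X generalizing s with
  | nil =>
    simp only [prefList, List.not_mem_nil, false_iff]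
    rintro ⟨a, b, hab, ha, _⟩
    exact ha (List.append_eq_nil_iff.mp hab.symm).1
  | cons t ts ih =>
    simp only [prefList, List.mem_cons, ih]
    constructor
    · rintro (rfl | ⟨a, b, rfl, _, rfl⟩)
      · exact ⟨[t], ts, rfl, by simp, by simp⟩
      · exact ⟨t :: a, b, rfl, by simp, by simp; ring⟩
    · rintro ⟨a, b, hab, ha, rfl⟩
      match a, hab with
      | t' :: a', hab =>
        obtain ⟨rfl, rfl⟩ : t' = t ∧ ts = a' ++ b := by
          have := List.cons.injEq .. ▸ hab
          exact ⟨this.1.symm, this.2⟩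
        rcases a' with _ | ⟨u, a''⟩
        · left; simp
        · right
          exact ⟨u :: a'', b, rfl, by simp, by simp; ring⟩

-- B's fold: the flag ends true iff it started true or total//2 = T - (some suffix sum)
theorem foldB_eq (g : Int → Int) (T half : Int) (M : List Int) (s : Int) (f : Bool) :
    (M.foldl (fun p r => let s' := p.1 + g r; (s', p.2 || decide (T - s' = half))) (s, f)).2 =
      (f || (prefList s (M.map g)).any (fun x => decide (T - x = half))) := by
  induction M generalizing s f with
  | nil => simp [prefList]
  | cons r M' ih =>
    simp only [List.foldl_cons, List.map_cons, prefList, List.any_cons, ih, Bool.or_assoc]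

-- the reverse/complement bijection on splits of K
theorem mem_iff_rev (h half : Int) (K : List Int) :
    (half = h ∨ half ∈ prefList h K) ↔
      (h + K.sum = half ∨ ∃ x ∈ prefList 0 K.reverse, h + K.sum - x = half) := by
  have lhs : (half = h ∨ half ∈ prefList h K) ↔ ∃ a b, K = a ++ b ∧ half = h + a.sum := by
    rw [mem_prefList]
    constructor
    · rintro (rfl | ⟨a, b, hab, _, rfl⟩)
      · exact ⟨[], K, rfl, by simp⟩
      · exact ⟨a, b, hab, rfl⟩
    · rintro ⟨a, b, hab, rfl⟩
      rcases a with _ | ⟨u, a'⟩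
      · left; simp
      · right; exact ⟨u :: a', b, hab, by simp, rfl⟩
  have rhs : (h + K.sum = half ∨ ∃ x ∈ prefList 0 K.reverse, h + K.sum - x = half) ↔
      ∃ a b, K = a ++ b ∧ half = h + a.sum := by
    constructor
    · rintro (rfl | ⟨x, hx, rfl⟩)
      · exact ⟨K, [], by simp⟩
      · rw [mem_prefList] at hx
        obtain ⟨a', b', hab, _, rfl⟩ := hx
        have hKs : K.sum = a'.sum + b'.sum := by
          have : K.reverse.sum = (a' ++ b').sum := by rw [hab]
          simp at this; omega
        refine ⟨b'.reverse, a'.reverse, ?_, by simp; omega⟩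
        have : K.reverse.reverse = (a' ++ b').reverse := by rw [hab]
        simpa using this
    · rintro ⟨a, b, rfl, rfl⟩
      rcases b with _ | ⟨u, b'⟩
      · left; simp
      · right
        refine ⟨(u :: b').reverse.sum, ?_, by simp; ring⟩
        rw [mem_prefList]
        exact ⟨(u :: b').reverse, a.reverse, by simp, by simp, by simp⟩
  rw [lhs, rhs]

-- ===== VERDICT (by name: the statement is the Claim_ definition above) =====
theorem up_down_spec : Claim_equal_up_down := by
  intro N matrix total _ hpre
  obtain ⟨hN, hlen⟩ := hpre
  unfold Spec_up_down up_down up_down_alt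
  rw [if_neg (show ¬ N < 2 by omega), loopA_eq N matrix total (N - 1).toNat 0 0 (by omega)]
  simp only [foldB_eq]
  set half := PySem.Int.floordiv total 2 with hh
  have hsplit : PySem.List.pyRange 0 (N - 1) 1 = 0 :: PySem.List.pyRange 1 (N - 1) 1 :=
    PySem.List.pyRange_one_cons (by omega)
  have hrev : PySem.List.pyRange (N - 2) 0 (-1) = (PySem.List.pyRange 1 (N - 1) 1).reverse := by
    rw [PySem.List.pyRange_neg_one_eq_reverse]
    rw [show N - 2 + 1 = N - 1 from by omega]
    norm_num
  set K := (PySem.List.pyRange 1 (N - 1) 1).map (rowSumB matrix) with hK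
  have hmapped : (PySem.List.pyRange 0 (N - 1) 1).map (rowSumB matrix) = rowSumB matrix 0 :: K := by
    rw [hsplit, List.map_cons]
  rw [hmapped, hrev, List.map_reverse, ← hK]
  set h0 := rowSumB matrix 0 with hh0
  have key := mem_iff_rev h0 half K
  have hbool : ((decide ((h0 :: K).sum = half)) ||
      (prefList 0 K.reverse).any (fun x => decide ((h0 :: K).sum - x = half))) = true
      ↔ half ∈ prefList 0 (h0 :: K) := by
    simp only [Bool.or_eq_true, decide_eq_true_eq, List.any_eq_true, List.sum_cons,
      prefList, List.mem_cons, zero_add]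
    exact key.symm
  rw [if_congr hbool rfl rfl]
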